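-- pv_equiv track=rewrite | github.com/vaibhavuttam8/triade_agent | digital_front_desk/critical_keywords.py | count_expected_resources
-- ===== SOURCE A (Python) =====
-- from typing import Set, Dict, List, Tuple
--
-- RESOURCE_KEYWORDS: Dict[str, List[str]] = {
--     # Lab test resources
--     "blood test": [],
--     "urine test": [],
--     "lab work": [],
--     "cultures": [],
--     "strep test": [],
--     "flu test": [],
--     "covid test": [],
--
--     # Imaging resources
--     "x-ray": [],
--     "ultrasound": [],
--     "ct scan": [],
--     "mri": [],
--
--     # IV fluids or medications
--     "iv fluids": [],
--     "intravenous": [],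
--     "iv medication": [],
--     "antibiotic": ["iv"],
--
--     # Procedures
--     "stitches": [],
--     "sutures": [],
--     "wound care": [],
--     "splint": [],
--     "cast": [],
--     "incision and drainage": [],
--     "intubation": [],
--     "catheter": [],
--
--     # Specialist consultations
--     "specialist": [],
--     "cardiology": [],
--     "neurology": [],
--     "orthopedics": [],
--     "surgery": [],
--     "obgyn": [],
--     "pediatric specialist": [],
-- }
--
-- def detect_resource_keywords(text: str) -> List[str]:
--     """
--     Detect keywords related to resource needs.
--     Returns a list of detected resource keywords.
--     """
--     text = text.lower()
--     detected_keywords = []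
--
--     for keyword, contexts in RESOURCE_KEYWORDS.items():
--         if keyword.lower() in text:
--             if not contexts:
--                 detected_keywords.append(keyword)
--             elif any(context.lower() in text for context in contexts):
--                 detected_keywords.append(keyword)
--
--     return detected_keywords
--
-- def count_expected_resources(text: str) -> int:
--     """
--     Count the number of unique resources likely needed based on keywords.
--     Returns an integer count of resources.
--     """
--     # Get unique resource types from detected keywords
--     resource_keywords = detect_resource_keywords(text)
--
--     # Map to resource categories
--     resource_categories = set()
--
--     for keyword in resource_keywords:
--         if any(lab_term in keyword for lab_term in ["blood", "urine", "lab", "test", "culture"]):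
--             resource_categories.add("lab")
--         elif any(imaging_term in keyword for imaging_term in ["x-ray", "ultrasound", "ct", "mri"]):
--             resource_categories.add("imaging")
--         elif any(iv_term in keyword for iv_term in ["iv", "intravenous"]):
--             resource_categories.add("iv")
--         elif any(procedure_term in keyword for procedure_term in ["stitches", "sutures", "wound", "splint", "cast", "drainage", "intubation", "catheter"]):
--             resource_categories.add("procedure")
--         elif any(specialist_term in keyword for specialist_term in ["specialist", "cardiology", "neurology", "orthopedics", "surgery", "obgyn", "pediatric"]):
--             resource_categories.add("specialist")
--
--     return len(resource_categories)
-- ===== SOURCE B (Python) =====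
-- from typing import Dict, List
--
-- RESOURCE_KEYWORDS: Dict[str, List[str]] = {
--     "blood test": [], "urine test": [], "lab work": [], "cultures": [],
--     "strep test": [], "flu test": [], "covid test": [],
--     "x-ray": [], "ultrasound": [], "ct scan": [], "mri": [],
--     "iv fluids": [], "intravenous": [], "iv medication": [], "antibiotic": ["iv"],
--     "stitches": [], "sutures": [], "wound care": [], "splint": [], "cast": [],
--     "incision and drainage": [], "intubation": [], "catheter": [],
--     "specialist": [], "cardiology": [], "neurology": [], "orthopedics": [],
--     "surgery": [], "obgyn": [], "pediatric specialist": [],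
-- }
--
-- # Inverted index: each resource category with the keywords that trigger it.
-- # "antibiotic" appears in no category (A's cascade classifies it as nothing),
-- # so a category is needed exactly when one of its trigger keywords occurs.
-- CATEGORY_TRIGGERS: Dict[str, List[str]] = {
--     "lab": ["blood test", "urine test", "lab work", "cultures",
--             "strep test", "flu test", "covid test"],
--     "imaging": ["x-ray", "ultrasound", "ct scan", "mri"],
--     "iv": ["iv fluids", "intravenous", "iv medication"],
--     "procedure": ["stitches", "sutures", "wound care", "splint", "cast",
--                   "incision and drainage", "intubation", "catheter"],
--     "specialist": ["specialist", "cardiology", "neurology", "orthopedics",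
--                    "surgery", "obgyn", "pediatric specialist"],
-- }
--
-- def count_expected_resources(text: str) -> int:
--     t = text.lower()
--     return sum(any(k in t for k in triggers)
--                for triggers in CATEGORY_TRIGGERS.values())
-- ===== Notes on version B (the rewrite author's own statement) =====
-- stated objective: simpler
-- what changed: Inverts the data flow: instead of detecting keywords, classifying each through elif substring cascades and counting a set of categories, B uses an inverted index from each of the 5 categories to its trigger keywords and returns the sum over categories of whether any trigger occurs in the text - no detected-keyword list, no classification pass, no set.
import Mathlib
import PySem

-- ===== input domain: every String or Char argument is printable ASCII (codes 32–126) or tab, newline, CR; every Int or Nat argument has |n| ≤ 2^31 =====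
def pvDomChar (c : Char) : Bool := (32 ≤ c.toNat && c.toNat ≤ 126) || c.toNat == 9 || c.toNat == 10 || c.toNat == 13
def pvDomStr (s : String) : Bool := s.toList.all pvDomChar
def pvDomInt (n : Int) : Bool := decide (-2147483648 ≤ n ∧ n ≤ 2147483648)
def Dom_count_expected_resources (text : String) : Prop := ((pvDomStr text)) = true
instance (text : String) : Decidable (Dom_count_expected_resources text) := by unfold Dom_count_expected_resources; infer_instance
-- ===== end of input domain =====

-- B inverts A's data flow: instead of detecting keywords and classifying each through elif
-- substring cascades into a set, B sums over an inverted category→trigger-keywords index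
-- (objective: simpler).

-- ===== PORT A =====
-- the module-level dict RESOURCE_KEYWORDS (insertion order)
def RESOURCE_KEYWORDS : List (String × List String) :=
  [("blood test", []), ("urine test", []), ("lab work", []), ("cultures", []),
   ("strep test", []), ("flu test", []), ("covid test", []),
   ("x-ray", []), ("ultrasound", []), ("ct scan", []), ("mri", []),
   ("iv fluids", []), ("intravenous", []), ("iv medication", []), ("antibiotic", ["iv"]),
   ("stitches", []), ("sutures", []), ("wound care", []), ("splint", []), ("cast", []),
   ("incision and drainage", []), ("intubation", []), ("catheter", []),
   ("specialist", []), ("cardiology", []), ("neurology", []), ("orthopedics", []),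
   ("surgery", []), ("obgyn", []), ("pediatric specialist", [])]

def detect_resource_keywords (text : String) : List String :=
  let t := PySem.Str.lower text
  RESOURCE_KEYWORDS.foldl (fun detected p =>
    if PySem.Str.isIn (PySem.Str.lower p.1) t then
      if p.2.isEmpty then detected ++ [p.1]
      else if p.2.any (fun c => PySem.Str.isIn (PySem.Str.lower c) t) then detected ++ [p.1]
      else detected
    else detected) []

-- the body of A's for-loop over resource_keywords (the elif cascade adding a category)
def addCategory (s : PySem.Set String) (keyword : String) : PySem.Set String :=
  if ["blood", "urine", "lab", "test", "culture"].any (fun term => PySem.Str.isIn term keyword) then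
    s.add "lab"
  else if ["x-ray", "ultrasound", "ct", "mri"].any (fun term => PySem.Str.isIn term keyword) then
    s.add "imaging"
  else if ["iv", "intravenous"].any (fun term => PySem.Str.isIn term keyword) then
    s.add "iv"
  else if ["stitches", "sutures", "wound", "splint", "cast", "drainage", "intubation", "catheter"].any
      (fun term => PySem.Str.isIn term keyword) then
    s.add "procedure"
  else if ["specialist", "cardiology", "neurology", "orthopedics", "surgery", "obgyn", "pediatric"].any
      (fun term => PySem.Str.isIn term keyword) then
    s.add "specialist"
  else s

def count_expected_resources (text : String) : Int :=
  let resource_keywords := detect_resource_keywords text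
  let resource_categories := resource_keywords.foldl addCategory PySem.Set.empty
  PySem.Set.len resource_categories

-- ===== PORT B =====
-- Source B's inverted index: each category of the cascade with the keywords that trigger it
-- ("antibiotic" triggers none)
def CATEGORY_TRIGGERS : List (String × List String) :=
  [("lab", ["blood test", "urine test", "lab work", "cultures",
            "strep test", "flu test", "covid test"]),
   ("imaging", ["x-ray", "ultrasound", "ct scan", "mri"]),
   ("iv", ["iv fluids", "intravenous", "iv medication"]),
   ("procedure", ["stitches", "sutures", "wound care", "splint", "cast",
                  "incision and drainage", "intubation", "catheter"]),
   ("specialist", ["specialist", "cardiology", "neurology", "orthopedics",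
                   "surgery", "obgyn", "pediatric specialist"])]

def count_expected_resources_alt (text : String) : Int :=
  let t := PySem.Str.lower text
  CATEGORY_TRIGGERS.foldl
    (fun acc p => acc + (if p.2.any (fun k => PySem.Str.isIn k t) then 1 else 0)) 0

-- ===== PRECONDITION & SPEC =====
def Spec_count_expected_resources (text : String) (out : Int) : Prop := out = count_expected_resources_alt text
instance (text : String) (out : Int) : Decidable (Spec_count_expected_resources text out) := by unfold Spec_count_expected_resources; infer_instance

-- ===== CLAIM =====
def Claim_equal_count_expected_resources : Prop := ∀ (text : String), Dom_count_expected_resources text → Spec_count_expected_resources text (count_expected_resources text)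

-- ===== LEMMAS AND PROOFS =====

-- A's detection condition, as one boolean
def detCond (t : String) (p : String × List String) : Bool :=
  PySem.Str.isIn (PySem.Str.lower p.1) t &&
    (p.2.isEmpty || p.2.any (fun c => PySem.Str.isIn (PySem.Str.lower c) t))

-- A's category cascade as a pure classification function
def catOf (keyword : String) : Option String :=
  if ["blood", "urine", "lab", "test", "culture"].any (fun term => PySem.Str.isIn term keyword) then
    some "lab"
  else if ["x-ray", "ultrasound", "ct", "mri"].any (fun term => PySem.Str.isIn term keyword) then
    some "imaging"
  else if ["iv", "intravenous"].any (fun term => PySem.Str.isIn term keyword) then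
    some "iv"
  else if ["stitches", "sutures", "wound", "splint", "cast", "drainage", "intubation", "catheter"].any
      (fun term => PySem.Str.isIn term keyword) then
    some "procedure"
  else if ["specialist", "cardiology", "neurology", "orthopedics", "surgery", "obgyn", "pediatric"].any
      (fun term => PySem.Str.isIn term keyword) then
    some "specialist"
  else none

-- A's whole per-keyword step, detection and classification fused
def gstep (t : String) (s : PySem.Set String) (p : String × List String) : PySem.Set String :=
  if PySem.Str.isIn p.1 t then
    match catOf p.1 with
    | some c => s.add c
    | none => s
  else s

lemma addCategory_eq_catOf (s : PySem.Set String) (k : String) :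
    addCategory s k = match catOf k with | some c => s.add c | none => s := by
  unfold addCategory catOf
  split_ifs <;> rfl

lemma detect_eq_filter (text : String) :
    detect_resource_keywords text
      = (RESOURCE_KEYWORDS.filter (detCond (PySem.Str.lower text))).map Prod.fst := by
  unfold detect_resource_keywords
  dsimp only
  refine (PySem.List.foldl_congr_mem _ _
      (fun detected p => if detCond (PySem.Str.lower text) p then detected ++ [p.1] else detected)
      _ ?_).trans ?_
  · intro acc p _
    unfold detCond
    cases h1 : PySem.Str.isIn (PySem.Str.lower p.1) (PySem.Str.lower text) <;>
      cases h2 : p.2.isEmpty <;>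
        cases h3 : p.2.any (fun c => PySem.Str.isIn (PySem.Str.lower c) (PySem.Str.lower text)) <;>
          simp only [h1, h2, h3] <;> simp
  · rw [PySem.List.foldl_append_if]
    simp

-- every keyword in the table is already lowercase
lemma lower_fst (p : String × List String) (hp : p ∈ RESOURCE_KEYWORDS) :
    PySem.Str.lower p.1 = p.1 := by
  revert p; decide

-- context lists are [] or ["iv"]
lemma ctx_cases (p : String × List String) (hp : p ∈ RESOURCE_KEYWORDS) :
    p.2 = [] ∨ p.2 = ["iv"] := by
  revert p; decide

-- the cascade classifies the context-bearing keyword ("antibiotic") as nothing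
lemma ctx_catOf_none (p : String × List String) (hp : p ∈ RESOURCE_KEYWORDS)
    (h : p.2 = ["iv"]) : catOf p.1 = none := by
  revert p; decide

-- A's filtered-then-classified step equals the fused step on every table entry
lemma step_eq (t : String) (s : PySem.Set String) (p : String × List String)
    (hp : p ∈ RESOURCE_KEYWORDS) :
    (if detCond t p then addCategory s p.1 else s) = gstep t s p := by
  rw [addCategory_eq_catOf]
  unfold detCond gstep
  rw [lower_fst p hp]
  rcases ctx_cases p hp with h | h
  · simp [h]
  · rw [ctx_catOf_none p hp h]
    cases PySem.Str.isIn p.1 t <;> simp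

lemma set_add_idem (s : PySem.Set String) (x : String) : (s.add x).add x = s.add x :=
  PySem.Set.add_of_mem ((PySem.Set.mem_add _ _ _).mpr (Or.inr rfl))

-- folding the fused step over a group of keywords all classified as c
lemma fold_const_cat (t : String) (c : String) (G : List (String × List String))
    (h : ∀ p ∈ G, catOf p.1 = some c) (s₀ : PySem.Set String) :
    G.foldl (gstep t) s₀
      = if G.any (fun p => PySem.Str.isIn p.1 t) then s₀.add c else s₀ := by
  induction G generalizing s₀ with
  | nil => simp
  | cons p G ih =>
    have hc := h p (List.mem_cons_self ..)
    have hG : ∀ q ∈ G, catOf q.1 = some c := fun q hq => h q (List.mem_cons_of_mem _ hq)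
    cases hb : PySem.Str.isIn p.1 t
    · rw [List.foldl_cons, show gstep t s₀ p = s₀ by unfold gstep; rw [hb]; simp, ih hG,
        List.any_cons, hb, Bool.false_or]
    · rw [List.foldl_cons,
        show gstep t s₀ p = s₀.add c by unfold gstep; rw [hb, hc]; simp, ih hG,
        List.any_cons, hb, Bool.true_or, if_pos rfl]
      split_ifs with h1
      · exact set_add_idem _ _
      · rfl

-- the five keyword groups of RESOURCE_KEYWORDS, plus the inert "antibiotic" entry
def Glab : List (String × List String) :=
  [("blood test", []), ("urine test", []), ("lab work", []), ("cultures", []),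
   ("strep test", []), ("flu test", []), ("covid test", [])]
def Gimg : List (String × List String) :=
  [("x-ray", []), ("ultrasound", []), ("ct scan", []), ("mri", [])]
def Giv : List (String × List String) :=
  [("iv fluids", []), ("intravenous", []), ("iv medication", [])]
def Gproc : List (String × List String) :=
  [("stitches", []), ("sutures", []), ("wound care", []), ("splint", []), ("cast", []),
   ("incision and drainage", []), ("intubation", []), ("catheter", [])]
def Gspec : List (String × List String) :=
  [("specialist", []), ("cardiology", []), ("neurology", []), ("orthopedics", []),
   ("surgery", []), ("obgyn", []), ("pediatric specialist", [])]

lemma RW_split :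
    RESOURCE_KEYWORDS
      = Glab ++ Gimg ++ Giv ++ [("antibiotic", ["iv"])] ++ Gproc ++ Gspec := rfl

set_option maxHeartbeats 1000000 in
theorem count_eq (text : String) :
    count_expected_resources text = count_expected_resources_alt text := by
  unfold count_expected_resources count_expected_resources_alt
  dsimp only
  rw [detect_eq_filter, List.foldl_map, List.foldl_filter]
  rw [PySem.List.foldl_congr_mem _ _ (gstep (PySem.Str.lower text)) _
      (fun s p hp => step_eq (PySem.Str.lower text) s p hp)]
  set t := PySem.Str.lower text with ht
  rw [RW_split]
  simp only [List.foldl_append]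
  rw [fold_const_cat t "lab" Glab (by decide),
      fold_const_cat t "imaging" Gimg (by decide),
      fold_const_cat t "iv" Giv (by decide),
      show ∀ s, List.foldl (gstep t) s [("antibiotic", ["iv"])] = s by
        intro s
        simp [gstep, show catOf "antibiotic" = none from by decide],
      fold_const_cat t "procedure" Gproc (by decide),
      fold_const_cat t "specialist" Gspec (by decide)]
  have hlab : Glab.any (fun p => PySem.Str.isIn p.1 t)
      = ["blood test", "urine test", "lab work", "cultures",
         "strep test", "flu test", "covid test"].any (fun k => PySem.Str.isIn k t) := by
    simp [Glab]
  have himg : Gimg.any (fun p => PySem.Str.isIn p.1 t)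
      = ["x-ray", "ultrasound", "ct scan", "mri"].any (fun k => PySem.Str.isIn k t) := by
    simp [Gimg]
  have hiv : Giv.any (fun p => PySem.Str.isIn p.1 t)
      = ["iv fluids", "intravenous", "iv medication"].any (fun k => PySem.Str.isIn k t) := by
    simp [Giv]
  have hproc : Gproc.any (fun p => PySem.Str.isIn p.1 t)
      = ["stitches", "sutures", "wound care", "splint", "cast",
         "incision and drainage", "intubation", "catheter"].any (fun k => PySem.Str.isIn k t) := by
    simp [Gproc]
  have hspec : Gspec.any (fun p => PySem.Str.isIn p.1 t)
      = ["specialist", "cardiology", "neurology", "orthopedics",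
         "surgery", "obgyn", "pediatric specialist"].any (fun k => PySem.Str.isIn k t) := by
    simp [Gspec]
  simp only [CATEGORY_TRIGGERS, List.foldl_cons, List.foldl_nil]
  rw [hlab, himg, hiv, hproc, hspec]
  generalize ["blood test", "urine test", "lab work", "cultures",
      "strep test", "flu test", "covid test"].any (fun k => PySem.Str.isIn k t) = b1
  generalize ["x-ray", "ultrasound", "ct scan", "mri"].any (fun k => PySem.Str.isIn k t) = b2
  generalize ["iv fluids", "intravenous", "iv medication"].any (fun k => PySem.Str.isIn k t) = b3
  generalize ["stitches", "sutures", "wound care", "splint", "cast",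
      "incision and drainage", "intubation", "catheter"].any (fun k => PySem.Str.isIn k t) = b4
  generalize ["specialist", "cardiology", "neurology", "orthopedics",
      "surgery", "obgyn", "pediatric specialist"].any (fun k => PySem.Str.isIn k t) = b5
  cases b1 <;> cases b2 <;> cases b3 <;> cases b4 <;> cases b5 <;> decide

-- ===== VERDICT =====
theorem count_expected_resources_spec : Claim_equal_count_expected_resources := by
  intro text _
  unfold Spec_count_expected_resources
  exact count_eq text
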